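-- pv_equiv track=rewrite | github.com/databrickslabs/meta-conversions-api-app | app/server/assets/register_udtf.py | strip_imports_and_decorators
-- ===== SOURCE A (Python) =====
-- def strip_imports_and_decorators(src: str, remove_patterns: list[str] = None) -> str:
--     """Remove specific import lines and decorators from source."""
--     lines = src.split("\n")
--     filtered = []
--     skip_next_class = False
--     for line in lines:
--         if remove_patterns and any(p in line for p in remove_patterns):
--             if line.strip().startswith("@"):
--                 skip_next_class = True
--             continue
--         if skip_next_class and line.strip().startswith("class "):
--             skip_next_class = False
--             continue
--         if skip_next_class and line.strip() == "":
--             continue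
--         if skip_next_class:
--             continue
--         filtered.append(line)
--     return "\n".join(filtered)
-- ===== SOURCE B (Python) =====
-- def strip_imports_and_decorators(src: str, remove_patterns: list[str] = None) -> str:
--     """Remove specific import lines and decorators from source."""
--     lines = src.split("\n")
--     pats = remove_patterns or []
--     kept = []
--     i, n = 0, len(lines)
--     while i < n:
--         line = lines[i]
--         i += 1
--         if any(p in line for p in pats):
--             if line.strip().startswith("@"):
--                 # matched decorator: consume following lines up to and including
--                 # the first class line that does not itself match the patterns
--                 while i < n:
--                     cur = lines[i]
--                     i += 1
--                     if cur.strip().startswith("class ") and not any(p in cur for p in pats):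
--                         break
--             continue
--         kept.append(line)
--     return "\n".join(kept)
-- ===== Notes on version B (the rewrite author's own statement) =====
-- stated objective: alternative
-- what changed: Replaces A's single pass carrying a skip_next_class boolean with an index-based outer while loop plus an explicit inner while loop that consumes the decorated block up to and including the first non-matching 'class ' line, so no flag state crosses iterations.
import Mathlib
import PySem

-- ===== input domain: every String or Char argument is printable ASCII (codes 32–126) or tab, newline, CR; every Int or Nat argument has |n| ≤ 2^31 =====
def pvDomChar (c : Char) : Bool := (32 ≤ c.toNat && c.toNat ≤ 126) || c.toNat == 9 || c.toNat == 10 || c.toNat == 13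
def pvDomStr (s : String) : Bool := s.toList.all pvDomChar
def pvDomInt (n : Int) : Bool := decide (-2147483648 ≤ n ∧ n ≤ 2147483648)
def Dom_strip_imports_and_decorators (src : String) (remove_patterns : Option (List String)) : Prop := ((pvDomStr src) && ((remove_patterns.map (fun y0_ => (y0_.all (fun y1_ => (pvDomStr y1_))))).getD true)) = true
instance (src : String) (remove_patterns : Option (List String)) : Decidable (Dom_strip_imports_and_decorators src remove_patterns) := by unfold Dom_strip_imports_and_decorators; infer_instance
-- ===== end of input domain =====

-- B replaces A's carried skip_next_class flag by an explicit outer index loop with an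
-- inner consuming loop (alternative decomposition, same cost); return value equivalence only.

-- ===== PORT A =====
-- 'remove_patterns and any(p in line for p in remove_patterns)' (truthiness of the list first)
def pvAMatch (remove_patterns : Option (List String)) (line : String) : Bool :=
  match remove_patterns with
  | none => false
  | some ps => !ps.isEmpty && ps.any (fun p => PySem.Str.isIn p line)

-- the for-loop of A, carried state = (filtered, skip_next_class)
def pvALoop (remove_patterns : Option (List String)) : List String → List String → Bool → List String
  | [], filtered, _ => filtered
  | line :: rest, filtered, skip =>
    if pvAMatch remove_patterns line then
      if PySem.Str.startswith (PySem.Str.strip line) "@" then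
        pvALoop remove_patterns rest filtered true
      else
        pvALoop remove_patterns rest filtered skip
    else if skip && PySem.Str.startswith (PySem.Str.strip line) "class " then
      pvALoop remove_patterns rest filtered false
    else if skip && (PySem.Str.strip line == "") then
      pvALoop remove_patterns rest filtered skip
    else if skip then
      pvALoop remove_patterns rest filtered skip
    else
      pvALoop remove_patterns rest (filtered ++ [line]) skip

def strip_imports_and_decorators (src : String) (remove_patterns : Option (List String)) : String :=
  PySem.Str.join "\n" (pvALoop remove_patterns ((PySem.Str.split? src "\n").getD []) [] false)

-- ===== PORT B =====
def pvBMatch (pats : List String) (line : String) : Bool :=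
  pats.any (fun p => PySem.Str.isIn p line)

-- the inner while loop of Source B: returns the lines remaining after the break (or [] at end)
def pvBSkip (pats : List String) : List String → List String
  | [] => []
  | cur :: rest =>
    if PySem.Str.startswith (PySem.Str.strip cur) "class " && !pvBMatch pats cur then rest
    else pvBSkip pats rest

theorem pvBSkip_length_le (pats : List String) (ls : List String) :
    (pvBSkip pats ls).length ≤ ls.length := by
  induction ls with
  | nil => simp [pvBSkip]
  | cons c rest ih =>
    simp only [pvBSkip]
    split
    · simp
    · simp; omega

-- the outer while loop of Source B (kept lines built front-to-back)
def pvBOuter (pats : List String) : List String → List String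
  | [] => []
  | line :: rest =>
    if pvBMatch pats line then
      if PySem.Str.startswith (PySem.Str.strip line) "@" then
        pvBOuter pats (pvBSkip pats rest)
      else
        pvBOuter pats rest
    else
      line :: pvBOuter pats rest
  termination_by ls => ls.length
  decreasing_by
  · exact Nat.lt_succ_of_le (pvBSkip_length_le _ _)
  · simp
  · simp

def strip_imports_and_decorators_alt (src : String) (remove_patterns : Option (List String)) : String :=
  PySem.Str.join "\n" (pvBOuter (remove_patterns.getD []) ((PySem.Str.split? src "\n").getD []))

-- ===== PRECONDITION & SPEC =====
def Spec_strip_imports_and_decorators (src : String) (remove_patterns : Option (List String)) (out : String) : Prop := out = strip_imports_and_decorators_alt src remove_patterns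
instance (src : String) (remove_patterns : Option (List String)) (out : String) : Decidable (Spec_strip_imports_and_decorators src remove_patterns out) := by unfold Spec_strip_imports_and_decorators; infer_instance

-- ===== CLAIM (what is proved, stated in full; the proofs are below) =====
def Claim_equal_strip_imports_and_decorators : Prop := ∀ (src : String) (remove_patterns : Option (List String)), Dom_strip_imports_and_decorators src remove_patterns → Spec_strip_imports_and_decorators src remove_patterns (strip_imports_and_decorators src remove_patterns)

-- ===== LEMMAS AND PROOFS =====

theorem pvMatch_eq (rp : Option (List String)) (line : String) :
    pvAMatch rp line = pvBMatch (rp.getD []) line := by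
  cases rp with
  | none => simp [pvAMatch, pvBMatch]
  | some ps =>
    cases ps with
    | nil => simp [pvAMatch, pvBMatch]
    | cons p ps' => simp [pvAMatch, pvBMatch]

-- in skip mode, A discards everything pvBSkip discards and exits skip mode exactly at the break
theorem pvALoop_skip (rp : Option (List String)) (ls acc : List String) :
    pvALoop rp ls acc true = pvALoop rp (pvBSkip (rp.getD []) ls) acc false := by
  induction ls generalizing acc with
  | nil => simp [pvALoop, pvBSkip]
  | cons line rest ih =>
    by_cases hm : pvAMatch rp line = true
    · have hm' : pvBMatch (rp.getD []) line = true := by rw [← pvMatch_eq]; exact hm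
      simp only [pvALoop, pvBSkip, hm, hm', Bool.not_true, Bool.and_false, if_true]
      split <;> exact ih acc
    · have hma : pvAMatch rp line = false := by simpa using hm
      have hm' : pvBMatch (rp.getD []) line = false := by rw [← pvMatch_eq]; exact hma
      simp only [pvALoop, pvBSkip, hma, hm', Bool.false_eq_true, if_false, Bool.not_false,
        Bool.and_true, Bool.true_and, if_true]
      by_cases hc : PySem.Str.startswith (PySem.Str.strip line) "class " = true
      · simp only [hc, if_true]
      · simp only [hc, Bool.false_eq_true, if_false]
        split <;> exact ih acc

theorem pvALoop_eq_outer (rp : Option (List String)) :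
    ∀ (n : ℕ) (ls acc : List String), ls.length ≤ n →
      pvALoop rp ls acc false = acc ++ pvBOuter (rp.getD []) ls := by
  intro n
  induction n with
  | zero =>
    intro ls acc h
    have : ls = [] := List.eq_nil_of_length_eq_zero (Nat.le_zero.mp h)
    subst this; simp [pvALoop, pvBOuter]
  | succ n ih =>
    intro ls acc h
    cases ls with
    | nil => simp [pvALoop, pvBOuter]
    | cons line rest =>
      have hr : rest.length ≤ n := by simpa using h
      by_cases hm : pvAMatch rp line = true
      · have hm' : pvBMatch (rp.getD []) line = true := by rw [← pvMatch_eq]; exact hm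
        by_cases hd : PySem.Str.startswith (PySem.Str.strip line) "@" = true
        · simp only [pvALoop, hm, hd, if_true, pvBOuter, hm']
          rw [pvALoop_skip]
          exact ih _ acc (le_trans (pvBSkip_length_le _ _) hr)
        · simp only [pvALoop, hm, hd, if_true, pvBOuter, hm']
          exact ih _ acc hr
      · have hm' : pvBMatch (rp.getD []) line = false := by rw [← pvMatch_eq]; simpa using hm
        simp only [pvALoop, hm, hm', Bool.false_eq_true, if_false, Bool.false_and, pvBOuter]
        rw [ih _ _ hr]
        simp

-- ===== VERDICT (by name: the statement is the Claim_ definition above) =====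
theorem strip_imports_and_decorators_spec : Claim_equal_strip_imports_and_decorators := by
  intro src rp _
  unfold Spec_strip_imports_and_decorators strip_imports_and_decorators strip_imports_and_decorators_alt
  rw [pvALoop_eq_outer rp ((PySem.Str.split? src "\n").getD []).length _ [] le_rfl]
  simp
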